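-- pv_equiv track=rewrite | github.com/DrayChou/smart-ai-router | core/services/model_service.py | _extract_tags_from_model_name
-- ===== SOURCE A (Python) =====
-- from typing import Dict, List, Any, Optional
--
-- def _extract_tags_from_model_name(model_name: str) -> List[str]:
--     """从模型名称中提取标签"""
--     import re
--     # 使用多种分隔符拆分模型名称
--     separators = [':', '/', '@', '-', '_', ',']
--     tags = [model_name.lower()]
--
--     for sep in separators:
--         new_tags = []
--         for tag in tags:
--             new_tags.extend([t.strip() for t in tag.split(sep) if t.strip()])
--         tags = new_tags
--
--     # 去重并返回
--     return list(set(tag for tag in tags if tag))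
-- ===== SOURCE B (Python) =====
-- def _extract_tags_from_model_name(model_name: str) -> list:
--     """Single-pass scanner: accumulate chars, flush a stripped token at each separator."""
--     seps = {':', '/', '@', '-', '_', ','}
--     result = set()
--     buf = []
--     for ch in model_name.lower():
--         if ch in seps:
--             t = ''.join(buf).strip()
--             if t:
--                 result.add(t)
--             buf = []
--         else:
--             buf.append(ch)
--     t = ''.join(buf).strip()
--     if t:
--         result.add(t)
--     return list(result)
-- ===== Notes on version B (the rewrite author's own statement) =====
-- stated objective: simpler
-- what changed: Replaces six sequential split/strip/filter passes over a growing token list by a single left-to-right character scan with a buffer that is stripped and flushed into the result set at each separator and at the end.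
import Mathlib
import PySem

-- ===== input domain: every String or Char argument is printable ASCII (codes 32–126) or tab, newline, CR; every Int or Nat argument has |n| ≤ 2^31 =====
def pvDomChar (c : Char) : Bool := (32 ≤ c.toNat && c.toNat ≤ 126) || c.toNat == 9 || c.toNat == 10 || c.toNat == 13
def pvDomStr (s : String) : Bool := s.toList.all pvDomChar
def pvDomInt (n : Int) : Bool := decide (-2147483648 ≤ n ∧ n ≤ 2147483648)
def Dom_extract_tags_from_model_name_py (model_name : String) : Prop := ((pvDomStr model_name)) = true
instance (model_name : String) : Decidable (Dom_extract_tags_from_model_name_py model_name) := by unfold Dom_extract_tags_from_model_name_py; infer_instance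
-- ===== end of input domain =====

-- B replaces A's six sequential split/strip/filter passes by a single character scan; objective: simpler (one pass, one buffer).

-- ===== PORT A =====
-- Literal port of A: start from [model_name.lower()], then for each of the six
-- separators re-split every tag, strip, and drop empties; finally dedupe via set().
-- Strings are handled on the List Char side (PySem.Chars), as PySem prescribes.
def extract_tags_from_model_name_py (model_name : String) : List String :=
  let separators : List Char := [':', '/', '@', '-', '_', ',']
  let tags : List (List Char) := [PySem.Chars.lower model_name.toList]
  let tags := separators.foldl (fun tags sep =>
    tags.foldl (fun new_tags tag =>
      new_tags ++ ((PySem.Chars.splitOn tag [sep]).filter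
        (fun t => !(PySem.Chars.strip t).isEmpty)).map PySem.Chars.strip) []) tags
  PySem.Set.ofList ((tags.filter (fun tag => !tag.isEmpty)).map String.ofList)

-- ===== PORT B =====
def pvSepB (c : Char) : Bool :=
  c == ':' || c == '/' || c == '@' || c == '-' || c == '_' || c == ','

-- flush: strip the buffer; add it to the result set if non-empty (Source B's `if t: result.add(t)`)
def pvFlushB (res : PySem.Set String) (buf : List Char) : PySem.Set String :=
  let t := PySem.Chars.strip buf
  if !t.isEmpty then PySem.Set.add res (String.ofList t) else res

-- the single-pass scanner of Source B: buffer chars, flush at each separator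
def pvScanB : List Char → List Char → PySem.Set String → PySem.Set String
  | [], buf, res => pvFlushB res buf
  | c :: cs, buf, res =>
      if pvSepB c then pvScanB cs [] (pvFlushB res buf)
      else pvScanB cs (buf ++ [c]) res

def extract_tags_from_model_name_py_alt (model_name : String) : List String :=
  pvScanB (PySem.Chars.lower model_name.toList) [] PySem.Set.empty

-- ===== PRECONDITION & SPEC =====
def Spec_extract_tags_from_model_name_py (model_name : String) (out : List String) : Prop := out = extract_tags_from_model_name_py_alt model_name
instance (model_name : String) (out : List String) : Decidable (Spec_extract_tags_from_model_name_py model_name out) := by unfold Spec_extract_tags_from_model_name_py; infer_instance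

-- ===== CLAIM (what is proved, stated in full; the proofs are below) =====
def Claim_equal_extract_tags_from_model_name_py : Prop := ∀ (model_name : String), Dom_extract_tags_from_model_name_py model_name → Spec_extract_tags_from_model_name_py model_name (extract_tags_from_model_name_py model_name)

-- ===== LEMMAS AND PROOFS =====

-- split a char list at every char satisfying p (empty pieces kept) — the common
-- normal form both ports are reduced to
def pvSplitAny (p : Char → Bool) : List Char → List (List Char)
  | [] => [[]]
  | c :: cs => if p c then [] :: pvSplitAny p cs else (pvSplitAny p cs).modifyHead (c :: ·)

-- strip every piece, drop the empty ones
def pvProc (p : Char → Bool) (s : List Char) : List (List Char) :=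
  ((pvSplitAny p s).map PySem.Chars.strip).filter (fun u => !u.isEmpty)

-- append w to the last piece
def pvAppLast (w : List Char) : List (List Char) → List (List Char)
  | [] => []
  | [u] => [u ++ w]
  | u :: us => u :: pvAppLast w us

theorem pvSplitAny_ne_nil (p : Char → Bool) (s : List Char) : pvSplitAny p s ≠ [] := by
  induction s with
  | nil => simp [pvSplitAny]
  | cons c cs ih =>
    simp only [pvSplitAny]
    split
    · simp
    · cases h : pvSplitAny p cs with
      | nil => exact absurd h ih
      | cons a t => simp [List.modifyHead_cons]

theorem pvSplitAny_congr {p q : Char → Bool} (h : ∀ a, p a = q a) (s : List Char) :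
    pvSplitAny p s = pvSplitAny q s := by
  induction s with
  | nil => rfl
  | cons c cs ih => simp only [pvSplitAny, h c, ih]

theorem pvProc_congr {p q : Char → Bool} (h : ∀ a, p a = q a) (s : List Char) :
    pvProc p s = pvProc q s := by
  unfold pvProc; rw [pvSplitAny_congr h]

theorem pvGo_single (c : Char) : ∀ (fuel : Nat) (l cur : List Char) (acc : List (List Char)),
    l.length ≤ fuel →
    PySem.Chars.splitOn.go [c] fuel l cur acc
      = acc.reverse ++ (pvSplitAny (· == c) l).modifyHead (cur.reverse ++ ·) := by
  intro fuel
  induction fuel with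
  | zero =>
    intro l cur acc hl
    have hl0 : l = [] := by cases l with | nil => rfl | cons a t => simp at hl
    subst hl0
    rw [PySem.Chars.splitOn.go.eq_def]
    simp [pvSplitAny]
  | succ n ih =>
    intro l cur acc hl
    cases l with
    | nil =>
      rw [PySem.Chars.splitOn.go.eq_def]
      simp [pvSplitAny]
    | cons ch rest =>
      rw [PySem.Chars.splitOn.go.eq_def]
      simp only [List.isPrefixOf_cons₂, List.isPrefixOf_nil_left, Bool.and_true]
      by_cases hb : c = ch
      · subst hb
        rw [if_pos (by simp)]
        rw [ih _ _ _ (by simpa using hl)]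
        simp only [pvSplitAny, List.reverse_cons, List.reverse_nil, List.length_cons, List.drop_succ_cons, List.drop_zero, List.length_nil]
        rw [if_pos (by simp)]
        simp only [List.modifyHead_cons, List.append_assoc, List.singleton_append, List.nil_append]
        cases h : pvSplitAny (· == c) rest with
        | nil => exact absurd h (pvSplitAny_ne_nil _ _)
        | cons a t => simp
      · rw [if_neg (by simp [hb])]
        rw [ih _ _ _ (by simpa using hl)]
        simp only [pvSplitAny, List.reverse_cons]
        rw [if_neg (by simp [Ne.symm hb])]
        cases h : pvSplitAny (· == c) rest with
        | nil => exact absurd h (pvSplitAny_ne_nil _ _)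
        | cons a t => simp [List.modifyHead_cons, List.append_assoc]

theorem pvSplitOn_single (s : List Char) (c : Char) :
    PySem.Chars.splitOn s [c] = pvSplitAny (· == c) s := by
  rw [PySem.Chars.splitOn]
  rw [pvGo_single c (s.length + 1) s [] [] (Nat.le_succ _)]
  cases h : pvSplitAny (· == c) s with
  | nil => exact absurd h (pvSplitAny_ne_nil _ _)
  | cons a t => simp

theorem pvSplitAny_or (p q : Char → Bool) (s : List Char) :
    (pvSplitAny p s).flatMap (pvSplitAny q) = pvSplitAny (fun a => p a || q a) s := by
  induction s with
  | nil => simp [pvSplitAny]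
  | cons c cs ih =>
    by_cases hp : p c
    · simp only [pvSplitAny, hp, if_pos, Bool.true_or]
      simp [pvSplitAny, ih]
    · by_cases hq : q c
      · simp only [pvSplitAny, hp, hq, Bool.false_or, if_pos, if_neg, Bool.false_eq_true,
          not_false_eq_true]
        cases h : pvSplitAny p cs with
        | nil => exact absurd h (pvSplitAny_ne_nil _ _)
        | cons a t =>
          rw [h] at ih
          simp only [List.modifyHead_cons, List.flatMap_cons, pvSplitAny, hq, if_pos] at *
          simp [← ih]
      · simp only [pvSplitAny, hp, hq, Bool.false_or, if_neg, Bool.false_eq_true,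
          not_false_eq_true]
        cases h : pvSplitAny p cs with
        | nil => exact absurd h (pvSplitAny_ne_nil _ _)
        | cons a t =>
          rw [h] at ih
          simp only [List.modifyHead_cons, List.flatMap_cons, pvSplitAny, hq, if_neg,
            Bool.false_eq_true, not_false_eq_true] at *
          cases h2 : pvSplitAny q a with
          | nil => exact absurd h2 (pvSplitAny_ne_nil _ _)
          | cons b u =>
            rw [h2] at ih
            simp only [List.modifyHead_cons, List.cons_append] at *
            rw [← ih]
            simp

theorem pvSplitAny_nosep (p : Char → Bool) (w : List Char) (h : ∀ a ∈ w, p a = false) :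
    pvSplitAny p w = [w] := by
  induction w with
  | nil => rfl
  | cons a t ih =>
    simp only [pvSplitAny, h a (by simp), Bool.false_eq_true, if_neg, not_false_eq_true]
    rw [ih (fun x hx => h x (by simp [hx]))]
    rfl

theorem pvSplitAny_append_left (p : Char → Bool) (w v : List Char) (h : ∀ a ∈ w, p a = false) :
    pvSplitAny p (w ++ v) = (pvSplitAny p v).modifyHead (w ++ ·) := by
  induction w with
  | nil =>
    cases hv : pvSplitAny p v with
    | nil => exact absurd hv (pvSplitAny_ne_nil _ _)
    | cons a t => simpa using hv
  | cons a t ih =>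
    simp only [List.cons_append, pvSplitAny, h a (by simp), Bool.false_eq_true, if_neg,
      not_false_eq_true]
    rw [ih (fun x hx => h x (by simp [hx]))]
    cases hv : pvSplitAny p v with
    | nil => exact absurd hv (pvSplitAny_ne_nil _ _)
    | cons b u => simp

theorem pvSplitAny_append_right (p : Char → Bool) (v w : List Char) (h : ∀ a ∈ w, p a = false) :
    pvSplitAny p (v ++ w) = pvAppLast w (pvSplitAny p v) := by
  induction v with
  | nil => rw [List.nil_append, pvSplitAny_nosep p w h]; rfl
  | cons a t ih =>
    by_cases hp : p a
    · simp only [List.cons_append, pvSplitAny, hp, if_pos]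
      rw [ih]
      cases ht : pvSplitAny p t with
      | nil => exact absurd ht (pvSplitAny_ne_nil _ _)
      | cons b u => rfl
    · simp only [List.cons_append, pvSplitAny, hp, Bool.false_eq_true, if_neg, not_false_eq_true]
      rw [ih]
      cases ht : pvSplitAny p t with
      | nil => exact absurd ht (pvSplitAny_ne_nil _ _)
      | cons b u =>
        cases u with
        | nil => simp [pvAppLast]
        | cons b2 u2 => simp [pvAppLast]

theorem pvStrip_ws_append (w u : List Char) (h : ∀ a ∈ w, PySem.Chars.isspace a = true) :
    PySem.Chars.strip (w ++ u) = PySem.Chars.strip u := by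
  simp only [PySem.Chars.strip, PySem.Chars.lstrip]
  rw [List.dropWhile_append, List.dropWhile_eq_nil_iff.mpr h]
  simp

theorem pvRstrip_append_ws (u w : List Char) (h : ∀ a ∈ w, PySem.Chars.isspace a = true) :
    PySem.Chars.rstrip (u ++ w) = PySem.Chars.rstrip u := by
  simp only [PySem.Chars.rstrip, List.reverse_append]
  rw [List.dropWhile_append,
    List.dropWhile_eq_nil_iff.mpr (fun x hx => h x (List.mem_reverse.mp hx))]
  simp

theorem pvStrip_append_ws (u w : List Char) (h : ∀ a ∈ w, PySem.Chars.isspace a = true) :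
    PySem.Chars.strip (u ++ w) = PySem.Chars.strip u := by
  by_cases he : (List.dropWhile PySem.Chars.isspace u).isEmpty
  · have hu : List.dropWhile PySem.Chars.isspace u = [] := by
      simpa [List.isEmpty_iff] using he
    have hw : List.dropWhile PySem.Chars.isspace w = [] := List.dropWhile_eq_nil_iff.mpr h
    simp [PySem.Chars.strip, PySem.Chars.lstrip, List.dropWhile_append, hu, hw,
      PySem.Chars.rstrip]
  · simp only [PySem.Chars.strip, PySem.Chars.lstrip, List.dropWhile_append, he, if_neg,
      Bool.false_eq_true, not_false_eq_true]
    exact pvRstrip_append_ws _ w h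

theorem pvMap_strip_appLast (w : List Char) (hw : ∀ a ∈ w, PySem.Chars.isspace a = true) :
    ∀ l : List (List Char),
      (pvAppLast w l).map PySem.Chars.strip = l.map PySem.Chars.strip := by
  intro l
  induction l with
  | nil => rfl
  | cons a t ih =>
    cases t with
    | nil => simp [pvAppLast, pvStrip_append_ws a w hw]
    | cons b u =>
      simp only [pvAppLast, List.map_cons]
      rw [ih]
      simp

theorem pvProc_ws_append (q : Char → Bool) (hq : ∀ a, PySem.Chars.isspace a = true → q a = false)
    (w v : List Char) (hw : ∀ a ∈ w, PySem.Chars.isspace a = true) :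
    pvProc q (w ++ v) = pvProc q v := by
  have hsf : ∀ a ∈ w, q a = false := fun a ha => hq a (hw a ha)
  unfold pvProc
  rw [pvSplitAny_append_left q w v hsf]
  cases hv : pvSplitAny q v with
  | nil => exact absurd hv (pvSplitAny_ne_nil _ _)
  | cons a t => simp [List.modifyHead_cons, pvStrip_ws_append w a hw]

theorem pvProc_append_ws (q : Char → Bool) (hq : ∀ a, PySem.Chars.isspace a = true → q a = false)
    (v w : List Char) (hw : ∀ a ∈ w, PySem.Chars.isspace a = true) :
    pvProc q (v ++ w) = pvProc q v := by
  have hsf : ∀ a ∈ w, q a = false := fun a ha => hq a (hw a ha)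
  unfold pvProc
  rw [pvSplitAny_append_right q v w hsf, pvMap_strip_appLast w hw]

theorem pvProc_strip (q : Char → Bool) (hq : ∀ a, PySem.Chars.isspace a = true → q a = false)
    (u : List Char) : pvProc q (PySem.Chars.strip u) = pvProc q u := by
  conv_rhs => rw [← List.takeWhile_append_dropWhile (p := PySem.Chars.isspace) (l := u)]
  rw [pvProc_ws_append q hq _ _ (fun a ha => List.mem_takeWhile_imp ha)]
  have hdw : List.dropWhile PySem.Chars.isspace u
      = PySem.Chars.strip u
        ++ (List.takeWhile PySem.Chars.isspace
              (List.dropWhile PySem.Chars.isspace u).reverse).reverse := by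
    conv_lhs => rw [← List.reverse_reverse (List.dropWhile PySem.Chars.isspace u)]
    conv_lhs =>
      rw [← List.takeWhile_append_dropWhile (p := PySem.Chars.isspace)
        (l := (List.dropWhile PySem.Chars.isspace u).reverse)]
    rw [List.reverse_append]
    rfl
  rw [hdw,
    pvProc_append_ws q hq _ _ (fun a ha => List.mem_takeWhile_imp (List.mem_reverse.mp ha))]

theorem pvFlatMap_filter_map {α β γ : Type} (l : List α) (f : α → β) (P : β → Bool)
    (g : β → List γ) (h : ∀ x ∈ l, P (f x) = false → g (f x) = []) :
    ((l.map f).filter P).flatMap g = l.flatMap (fun x => g (f x)) := by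
  induction l with
  | nil => rfl
  | cons a t ih =>
    simp only [List.map_cons, List.filter_cons]
    by_cases hp : P (f a)
    · rw [if_pos hp]
      simp only [List.flatMap_cons]
      rw [ih (fun x hx hfx => h x (by simp [hx]) hfx)]
    · rw [if_neg hp, List.flatMap_cons, h a (by simp) (by simpa using hp)]
      simp only [List.nil_append]
      exact ih (fun x hx hfx => h x (by simp [hx]) hfx)

theorem pvFlatMap_proc (q : Char → Bool) (l : List (List Char)) :
    l.flatMap (fun h => pvProc q h)
      = ((l.flatMap (pvSplitAny q)).map PySem.Chars.strip).filter (fun u => !u.isEmpty) := by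
  induction l with
  | nil => rfl
  | cons a t ih =>
    simp only [List.flatMap_cons, List.map_append, List.filter_append]
    rw [ih]
    rfl

theorem pvOnePass (p q : Char → Bool) (hq : ∀ a, PySem.Chars.isspace a = true → q a = false)
    (s : List Char) :
    (pvProc p s).flatMap (fun t => pvProc q t) = pvProc (fun a => p a || q a) s := by
  have hnil : ∀ x : List Char, (fun u => !u.isEmpty) (PySem.Chars.strip x) = false →
      pvProc q (PySem.Chars.strip x) = [] := by
    intro x hx
    have : PySem.Chars.strip x = [] := by
      simpa [List.isEmpty_iff] using hx
    rw [this]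
    rfl
  conv_lhs => rw [show pvProc p s
    = ((pvSplitAny p s).map PySem.Chars.strip).filter (fun u => !u.isEmpty) from rfl]
  rw [pvFlatMap_filter_map (pvSplitAny p s) PySem.Chars.strip _ (fun t => pvProc q t)
    (fun x _ hx => hnil x hx)]
  have hcg : (fun x => pvProc q (PySem.Chars.strip x)) = fun x => pvProc q x :=
    funext fun x => pvProc_strip q hq x
  rw [hcg, pvFlatMap_proc q, pvSplitAny_or p q s]
  rfl

theorem pvBeq_not_ws (c : Char) (hc : PySem.Chars.isspace c = false) :
    ∀ a, PySem.Chars.isspace a = true → (a == c) = false := by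
  intro a ha
  cases e : a == c with
  | false => rfl
  | true =>
    have hac : a = c := beq_iff_eq.mp e
    subst hac
    rw [hc] at ha
    cases ha

theorem pvPasses (S : List Char) (hS : ∀ c ∈ S, PySem.Chars.isspace c = false)
    (p : Char → Bool) (hp : ∀ a, PySem.Chars.isspace a = true → p a = false) (s : List Char) :
    S.foldl (fun tags sep =>
      tags.foldl (fun new_tags tag =>
        new_tags ++ ((PySem.Chars.splitOn tag [sep]).filter
          (fun t => !(PySem.Chars.strip t).isEmpty)).map PySem.Chars.strip) []) (pvProc p s)
    = pvProc (fun a => p a || S.contains a) s := by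
  induction S generalizing p with
  | nil =>
    simp only [List.foldl_nil]
    exact pvProc_congr (by intro a; simp) s
  | cons c S' ih =>
    have hc : PySem.Chars.isspace c = false := hS c (by simp)
    have hq := pvBeq_not_ws c hc
    rw [List.foldl_cons]
    have hstep : (pvProc p s).foldl (fun new_tags tag =>
        new_tags ++ ((PySem.Chars.splitOn tag [c]).filter
          (fun t => !(PySem.Chars.strip t).isEmpty)).map PySem.Chars.strip) []
        = pvProc (fun a => p a || a == c) s := by
      rw [PySem.List.foldl_append_eq_flatMap
        (fun tag => ((PySem.Chars.splitOn tag [c]).filter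
          (fun t => !(PySem.Chars.strip t).isEmpty)).map PySem.Chars.strip) (pvProc p s) []]
      simp only [List.nil_append]
      have hg : (fun tag => ((PySem.Chars.splitOn tag [c]).filter
          (fun t => !(PySem.Chars.strip t).isEmpty)).map PySem.Chars.strip)
          = fun tag => pvProc (· == c) tag := by
        funext tag
        rw [pvSplitOn_single tag c]
        simp only [pvProc, List.filter_map]
        rfl
      rw [hg]
      exact pvOnePass p (· == c) hq s
    rw [hstep]
    rw [ih (fun d hd => hS d (by simp [hd])) (fun a => p a || a == c)
      (fun a ha => by simp only []; rw [hp a ha, hq a ha]; rfl)]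
    exact pvProc_congr (by
      intro a
      by_cases hac : a = c
      · simp [hac]
      · have hb : (a == c) = false := beq_eq_false_iff_ne.mpr hac
        simp [hac, hb]) s

theorem pvScan_spec : ∀ (s buf : List Char) (res : PySem.Set String),
    (∀ a ∈ buf, pvSepB a = false) →
    pvScanB s buf res = PySem.Set.update res ((pvProc pvSepB (buf ++ s)).map String.ofList) := by
  intro s
  induction s with
  | nil =>
    intro buf res hbuf
    rw [List.append_nil]
    have hb : pvProc pvSepB buf
        = if !(PySem.Chars.strip buf).isEmpty then [PySem.Chars.strip buf] else [] := by
      unfold pvProc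
      rw [pvSplitAny_nosep pvSepB buf hbuf]
      simp only [List.map_cons, List.map_nil, List.filter]
      split <;> simp_all
    rw [hb]
    show pvFlushB res buf = _
    unfold pvFlushB
    split
    · simp_all [PySem.Set.update]
    · simp_all [PySem.Set.update]
  | cons c cs ih =>
    intro buf res hbuf
    by_cases hc : pvSepB c
    · rw [show pvScanB (c :: cs) buf res = pvScanB cs [] (pvFlushB res buf) from by
        simp [pvScanB, hc]]
      rw [ih [] (pvFlushB res buf) (by simp)]
      have hsplit : pvSplitAny pvSepB (buf ++ c :: cs) = buf :: pvSplitAny pvSepB cs := by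
        rw [pvSplitAny_append_left pvSepB buf (c :: cs) hbuf]
        simp only [pvSplitAny, hc, if_pos]
        simp
      have hproc : pvProc pvSepB (buf ++ c :: cs)
          = (if !(PySem.Chars.strip buf).isEmpty then [PySem.Chars.strip buf] else [])
            ++ pvProc pvSepB cs := by
        unfold pvProc
        rw [hsplit]
        simp only [List.map_cons, List.filter]
        split <;> simp_all [List.isEmpty_iff]
      rw [hproc, List.map_append]
      simp only [PySem.Set.update, List.foldl_append, List.nil_append]
      congr 1
      unfold pvFlushB
      split
      · simp_all [PySem.Set.update]
      · simp_all [PySem.Set.update]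
    · rw [show pvScanB (c :: cs) buf res = pvScanB cs (buf ++ [c]) res from by
        simp [pvScanB, hc]]
      rw [ih (buf ++ [c]) res (by
        intro a ha
        rcases List.mem_append.mp ha with h1 | h1
        · exact hbuf a h1
        · rw [List.mem_singleton.mp h1]; simpa using hc)]
      rw [List.append_assoc, List.singleton_append]

-- ===== VERDICT (by name: the statement is the Claim_ definition above) =====
set_option maxRecDepth 8192 in
theorem extract_tags_from_model_name_py_spec : Claim_equal_extract_tags_from_model_name_py := by
  intro m _
  unfold Spec_extract_tags_from_model_name_py
  have hB : extract_tags_from_model_name_py_alt m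
      = PySem.Set.ofList ((pvProc pvSepB (PySem.Chars.lower m.toList)).map String.ofList) := by
    unfold extract_tags_from_model_name_py_alt
    rw [pvScan_spec (PySem.Chars.lower m.toList) [] PySem.Set.empty (by simp)]
    rw [List.nil_append]
    exact PySem.Set.update_nil_left _
  have hA : extract_tags_from_model_name_py m
      = PySem.Set.ofList ((pvProc pvSepB (PySem.Chars.lower m.toList)).map String.ofList) := by
    unfold extract_tags_from_model_name_py
    simp only []
    rw [List.foldl_cons]
    rw [show List.foldl (fun new_tags tag =>
        new_tags ++ ((PySem.Chars.splitOn tag [':']).filter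
          (fun t => !(PySem.Chars.strip t).isEmpty)).map PySem.Chars.strip) []
        [PySem.Chars.lower m.toList] = pvProc (· == ':') (PySem.Chars.lower m.toList) from by
      simp only [List.foldl_cons, List.foldl_nil, List.nil_append]
      rw [pvSplitOn_single]
      simp only [pvProc, List.filter_map]
      rfl]
    rw [pvPasses ['/', '@', '-', '_', ','] (by intro c hc; fin_cases hc <;> rfl) (· == ':')
      (pvBeq_not_ws ':' (by rfl)) (PySem.Chars.lower m.toList)]
    have hcg : pvProc (fun a => a == ':' || ['/', '@', '-', '_', ','].contains a)
        (PySem.Chars.lower m.toList) = pvProc pvSepB (PySem.Chars.lower m.toList) :=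
      pvProc_congr (by intro a; simp [pvSepB, Bool.or_assoc, Bool.beq_eq_decide_eq]) _
    rw [hcg]
    have hfix : (pvProc pvSepB (PySem.Chars.lower m.toList)).filter (fun tag => !tag.isEmpty)
        = pvProc pvSepB (PySem.Chars.lower m.toList) := by
      simp only [pvProc, List.filter_filter]
      simp
    rw [hfix]
  rw [hA, hB]
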